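-- pv_equiv track=rewrite | github.com/svenbuerki/SRK_bioinformatics | Scripts/SRK_allele_sharing_EOs.py | compute_intersections
-- ===== SOURCE A (Python) =====
-- import itertools
--
-- def compute_intersections(group_sets):
--     """Return list of (frozenset_of_groups, allele_set) for every non-empty
--     intersection where alleles are EXCLUSIVE to exactly that combo of groups.
--     """
--     groups = list(group_sets.keys())  # preserve insertion order
--     intersections = []
--     for r in range(1, len(groups) + 1):
--         for combo in itertools.combinations(groups, r):
--             combo_set = frozenset(combo)
--             shared = set.intersection(*(group_sets[g] for g in combo))
--             others = set(groups) - combo_set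
--             if others:
--                 in_others = set.union(*(group_sets[g] for g in others))
--                 exclusive = shared - in_others
--             else:
--                 exclusive = shared
--             if exclusive:
--                 intersections.append((combo_set, exclusive))
--     intersections.sort(key=lambda x: len(x[1]), reverse=True)
--     return intersections, groups
-- ===== SOURCE B (Python) =====
-- def compute_intersections(group_sets):
--     """Bucket every allele by the exact combination of groups that contain it,
--     then order the buckets as A does: by bucket size (desc), ties in combo
--     enumeration order (combo size asc, then index-lexicographic)."""
--     groups = list(group_sets.keys())
--     n = len(groups)
--     buckets = {}  # tuple of groups (in `groups` order) -> list of alleles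
--     for g in groups:
--         for a in group_sets[g]:
--             sig = tuple(h for h in groups if a in group_sets[h])
--             if sig[0] == g:  # handle each allele once, at its first group
--                 buckets.setdefault(sig, []).append(a)
--     def rank(sig):
--         # position of `sig` in A's combinations enumeration: size first,
--         # then index-lexicographic, encoded as a single integer
--         return len(sig) * (1 << n) - sum(1 << (n - 1 - groups.index(g)) for g in sig)
--     entries = [(frozenset(sig), set(al))
--                for sig, al in sorted(buckets.items(), key=lambda kv: rank(kv[0]))]
--     entries.sort(key=lambda e: len(e[1]), reverse=True)
--     return entries, groups
-- ===== Notes on version B (the rewrite author's own statement) =====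
-- stated objective: faster
-- what changed: Instead of enumerating all 2^n group combinations and doing set algebra for each, B buckets every allele once by the exact tuple of groups containing it and then sorts the buckets into A's output order (bucket size descending, ties in combination-enumeration order) via an integer rank key.
import Mathlib
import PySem

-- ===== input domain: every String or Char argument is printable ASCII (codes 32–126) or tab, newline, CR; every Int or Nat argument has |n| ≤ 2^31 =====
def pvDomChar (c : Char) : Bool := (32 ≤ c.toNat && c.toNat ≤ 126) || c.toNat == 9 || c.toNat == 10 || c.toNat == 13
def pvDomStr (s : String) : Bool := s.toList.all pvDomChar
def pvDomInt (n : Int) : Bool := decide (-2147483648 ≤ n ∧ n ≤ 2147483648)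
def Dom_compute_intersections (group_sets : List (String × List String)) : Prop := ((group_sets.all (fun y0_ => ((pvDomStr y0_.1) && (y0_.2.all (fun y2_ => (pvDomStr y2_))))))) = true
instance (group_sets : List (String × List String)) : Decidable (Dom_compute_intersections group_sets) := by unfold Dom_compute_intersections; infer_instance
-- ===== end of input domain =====

-- B replaces A's exponential enumeration of all group combinations (set algebra per combo)
-- by bucketing each allele once under the tuple of groups containing it and sorting the buckets
-- into A's output order (objective: faster; measured).
-- ===== PORT A =====
-- pvDict: the call boundary — the Python argument is a dict[str, set[str]]; both ports
-- receive it as an assoc list and read it through the same dict-of-sets view.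
def pvDict (group_sets : List (String × List String)) : PySem.Dict String (List String) :=
  PySem.Dict.ofList (group_sets.map (fun p => (p.1, PySem.Set.ofList p.2)))

def compute_intersections (group_sets : List (String × List String)) : (List (List String × List String)) × List String :=
  let d := pvDict group_sets
  let groups := d.keys
  let intersections :=
    (PySem.List.pyRange 1 ((groups.length : Int) + 1)).foldl (fun acc r =>
      (PySem.List.combinations groups r.toNat).foldl (fun acc combo =>
        let combo_set := PySem.Set.ofList combo
        -- set.intersection(*(group_sets[g] for g in combo)); combo ≠ [] since r ≥ 1
        let shared := match combo with
          | [] => []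
          | c0 :: rest => rest.foldl (fun s g => PySem.Set.inter s (d.getD g [])) (d.getD c0 [])
        let others := PySem.Set.diff (PySem.Set.ofList groups) combo_set
        let exclusive :=
          if others ≠ [] then
            -- set.union(*(group_sets[g] for g in others)); others ≠ [] here
            let in_others := match others with
              | [] => []
              | o0 :: orest => orest.foldl (fun s g => PySem.Set.union s (d.getD g [])) (d.getD o0 [])
            PySem.Set.diff shared in_others
          else shared
        if exclusive ≠ [] then acc ++ [(combo_set, exclusive)] else acc) acc) []
  (PySem.List.sorted intersections (fun x => (x.2.length : Int)) true, groups)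

-- ===== PORT B =====
def compute_intersections_alt (group_sets : List (String × List String)) : (List (List String × List String)) × List String :=
  let d := pvDict group_sets
  let groups := d.keys
  let n := groups.length
  let sig : String → List String := fun a => groups.filter (fun h => decide (a ∈ d.getD h []))
  let buckets :=
    (groups.flatMap (fun g => (d.getD g []).map (fun a => (g, a)))).foldl
      (fun b p => if (sig p.2).head? = some p.1 then b.modify (sig p.2) [] (· ++ [p.2]) else b)
      PySem.Dict.empty
  let rank : List String → Int := fun s =>
    (s.length : Int) * 2 ^ n -
      (s.map (fun g => (2 : Int) ^ (n - 1 - ((PySem.List.index? groups g).getD 0)))).sum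
  let entries :=
    (PySem.List.sorted buckets.items (fun kv => rank kv.1) false).map
      (fun kv => (PySem.Set.ofList kv.1, PySem.Set.ofList kv.2))
  (PySem.List.sorted entries (fun e => (e.2.length : Int)) true, groups)

-- ===== PRECONDITION & SPEC =====
def Spec_compute_intersections (group_sets : List (String × List String)) (out : (List (List String × List String)) × List String) : Prop := out = compute_intersections_alt group_sets
instance (group_sets : List (String × List String)) (out : (List (List String × List String)) × List String) : Decidable (Spec_compute_intersections group_sets out) := by unfold Spec_compute_intersections; infer_instance

-- ===== CLAIM (what is proved, stated in full; the proofs are below) =====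
def Claim_equal_compute_intersections : Prop := ∀ (group_sets : List (String × List String)), Dom_compute_intersections group_sets → Spec_compute_intersections group_sets (compute_intersections group_sets)

-- ===== LEMMAS AND PROOFS =====

-- ---- proof-side abbreviations ----
def pvW (G : List String) (g : String) : Int :=
  (2 : Int) ^ (G.length - 1 - ((PySem.List.index? G g).getD 0))

def pvSig (d : PySem.Dict String (List String)) (G : List String) (a : String) : List String :=
  G.filter (fun h => decide (a ∈ d.getD h []))

def pvExcl (d : PySem.Dict String (List String)) (G : List String) : List String → List String
  | [] => []
  | c0 :: rest => (d.getD c0 []).filter (fun a => decide (pvSig d G a = c0 :: rest))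

def pvAll (G : List String) : List (List String) :=
  (List.range G.length).flatMap (fun i => PySem.List.combinations G (i + 1))

def pvEA (d : PySem.Dict String (List String)) (G : List String) : List (List String × List String) :=
  ((pvAll G).filter (fun C => decide (pvExcl d G C ≠ []))).map (fun C => (C, pvExcl d G C))

def pvRank (G : List String) (s : List String) : Int :=
  (s.length : Int) * 2 ^ G.length - (s.map (pvW G)).sum

def pvBuckets (d : PySem.Dict String (List String)) (G : List String) :
    PySem.Dict (List String) (List String) :=
  (G.flatMap (fun g => (d.getD g []).map (fun a => (g, a)))).foldl
    (fun b p => if (pvSig d G p.2).head? = some p.1 then b.modify (pvSig d G p.2) [] (· ++ [p.2]) else b)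
    PySem.Dict.empty

def pvSup : List Int → Prop
  | [] => True
  | x :: xs => xs.sum < x ∧ pvSup xs

-- ---- basic dictionary facts ----
lemma pvDict_keys_nodup (gs : List (String × List String)) : (pvDict gs).keys.Nodup := by
  exact PySem.Dict.nodup_keys_ofList _

lemma pvUpdate_val_nodup (l : List (String × List String)) (d : PySem.Dict String (List String))
    (hd : ∀ g, (d.getD g []).Nodup) (g : String) :
    ((d.update (l.map (fun p => (p.1, PySem.Set.ofList p.2)))).getD g []).Nodup := by
  induction l generalizing d with
  | nil => simp only [List.map_nil, PySem.Dict.update, List.foldl_nil]; exact hd g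
  | cons p t ih =>
      simp only [List.map_cons, PySem.Dict.update, List.foldl_cons]
      exact ih _ (fun g' => by
        by_cases h : g' = p.1
        · subst h; simp [PySem.Dict.getD_insert_self]
        · simpa [PySem.Dict.getD_insert_of_ne _ _ _ h] using hd g')

lemma pvDict_val_nodup (gs : List (String × List String)) (g : String) :
    ((pvDict gs).getD g []).Nodup := by
  have := pvUpdate_val_nodup gs PySem.Dict.empty (fun g' => by simp [PySem.Dict.getD_empty]) g
  simpa [pvDict, PySem.Dict.ofList, PySem.Dict.update] using this

-- ---- signature facts ----
lemma pvSig_sublist (d : PySem.Dict String (List String)) (G : List String) (a : String) :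
    (pvSig d G a).Sublist G := List.filter_sublist

lemma filter_mem_of_sublist (G C : List String) (hG : G.Nodup) (hC : C.Sublist G) :
    G.filter (fun g => decide (g ∈ C)) = C := by
  induction hC with
  | slnil => simp
  | @cons l₁ l₂ a h ih =>
      have ha : a ∉ l₂ := (List.nodup_cons.mp hG).1
      have hsub : l₁ ⊆ l₂ := h.subset
      have haC : a ∉ l₁ := fun hm => ha (hsub hm)
      simp only [List.filter_cons, decide_eq_true_eq]
      rw [if_neg (by simpa using haC)]
      exact ih (List.nodup_cons.mp hG).2
  | @cons₂ l₁ l₂ a h ih =>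
      have ha : a ∉ l₂ := (List.nodup_cons.mp hG).1
      simp only [List.filter_cons, decide_eq_true_eq, List.mem_cons, true_or, if_pos]
      congr 1
      rw [List.filter_congr (fun g hg => ?_)]
      · exact ih (List.nodup_cons.mp hG).2
      · simp only [decide_eq_decide]
        constructor
        · rintro (rfl | hm)
          · exact absurd hg ha
          · exact hm
        · exact Or.inr

lemma pvSig_eq_iff (d : PySem.Dict String (List String)) (G : List String) (hG : G.Nodup)
    (c0 : String) (rest : List String) (hC : (c0 :: rest).Sublist G) (a : String)
    (ha : a ∈ d.getD c0 []) :
    pvSig d G a = c0 :: rest ↔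
      ((∀ g ∈ rest, a ∈ d.getD g []) ∧ ∀ g ∈ G, g ∉ c0 :: rest → a ∉ d.getD g []) := by
  constructor
  · intro h
    constructor
    · intro g hg
      have hm : g ∈ pvSig d G a := by rw [h]; exact List.mem_cons_of_mem _ hg
      simp only [pvSig, List.mem_filter, decide_eq_true_eq] at hm
      exact hm.2
    · intro g hgG hgC hmem
      exact hgC (by rw [← h]; exact List.mem_filter.mpr ⟨hgG, decide_eq_true hmem⟩)
  · rintro ⟨h₁, h₂⟩
    have : pvSig d G a = G.filter (fun g => decide (g ∈ c0 :: rest)) := by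
      unfold pvSig
      apply List.filter_congr
      intro g hg
      simp only [decide_eq_decide]
      constructor
      · intro hm
        by_contra hc
        exact h₂ g hg hc hm
      · intro hm
        rw [List.mem_cons] at hm
        rcases hm with rfl | hm
        · exact ha
        · exact h₁ g hm
    rw [this, filter_mem_of_sublist G _ hG hC]

-- ---- A-side loop shapes ----
lemma pvInterFold (d : PySem.Dict String (List String)) (L : List String) (s : List String) :
    L.foldl (fun s g => PySem.Set.inter s (d.getD g [])) s
      = s.filter (fun a => decide (∀ g ∈ L, a ∈ d.getD g [])) := by
  induction L generalizing s with
  | nil =>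
      rw [List.foldl_nil, List.filter_eq_self.mpr (fun a _ => by simp)]
  | cons g t ih =>
      simp only [List.foldl_cons]
      rw [ih]
      unfold PySem.Set.inter
      rw [List.filter_filter]
      apply List.filter_congr
      intro a _
      rw [Bool.eq_iff_iff]
      simp only [List.mem_cons, Bool.and_eq_true, decide_eq_true_eq]
      constructor
      · rintro ⟨h1, h2⟩ g' (rfl | hg')
        · exact (by simpa [PySem.Set.contains_iff] using h2)
        · exact h1 g' hg'
      · intro h
        refine ⟨fun g' hg' => h g' (Or.inr hg'), ?_⟩
        simpa [PySem.Set.contains_iff] using h g (Or.inl rfl)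

lemma pvUnionFoldMem (d : PySem.Dict String (List String)) (L : List String) (s : List String)
    (a : String) :
    a ∈ L.foldl (fun s g => PySem.Set.union s (d.getD g [])) s ↔
      a ∈ s ∨ ∃ g ∈ L, a ∈ d.getD g [] := by
  induction L generalizing s with
  | nil => simp
  | cons g t ih =>
      simp only [List.foldl_cons]
      rw [ih]
      rw [PySem.Set.mem_union]
      constructor
      · rintro ((h | h) | ⟨g', hg', h⟩)
        · exact Or.inl h
        · exact Or.inr ⟨g, List.mem_cons_self, h⟩
        · exact Or.inr ⟨g', List.mem_cons_of_mem _ hg', h⟩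
      · rintro (h | ⟨g', hg', h⟩)
        · exact Or.inl (Or.inl h)
        · rw [List.mem_cons] at hg'
          rcases hg' with rfl | hg'
          · exact Or.inl (Or.inr h)
          · exact Or.inr ⟨g', hg', h⟩

lemma pvPyRangeMap (n : Nat) :
    PySem.List.pyRange 1 ((n : Int) + 1) = (List.range n).map (fun (i : Nat) => ((i : Int) + 1)) := by
  induction n with
  | zero => decide
  | succ m ih =>
      have h1 : ((m + 1 : Nat) : Int) + 1 = ((m : Int) + 1) + 1 := by push_cast; ring
      rw [h1, PySem.List.pyRange_one_succ_right (by omega), ih, List.range_succ]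
      simp

lemma pvFlatMapFilterMap {α β γ : Type} (l : List α) (f : α → List β) (p : β → Bool)
    (h : β → γ) :
    l.flatMap (fun i => ((f i).filter p).map h) = (((l.flatMap f).filter p).map h) := by
  induction l with
  | nil => simp
  | cons x t ih => simp [List.flatMap_cons, List.filter_append, List.map_append, ih]

lemma pvComboEval (d : PySem.Dict String (List String)) (G : List String) (hG : G.Nodup)
    (c0 : String) (rest : List String) (hC : (c0 :: rest).Sublist G) :
    (if PySem.Set.diff (PySem.Set.ofList G) (PySem.Set.ofList (c0 :: rest)) ≠ [] then
        PySem.Set.diff (rest.foldl (fun s g => PySem.Set.inter s (d.getD g [])) (d.getD c0 []))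
          (match PySem.Set.diff (PySem.Set.ofList G) (PySem.Set.ofList (c0 :: rest)) with
            | [] => []
            | o0 :: orest => orest.foldl (fun s g => PySem.Set.union s (d.getD g [])) (d.getD o0 []))
      else rest.foldl (fun s g => PySem.Set.inter s (d.getD g [])) (d.getD c0 []))
      = pvExcl d G (c0 :: rest) := by
  have hCnd : (c0 :: rest).Nodup := hC.nodup hG
  have hself : PySem.Set.ofList G = G := PySem.Set.ofList_eq_self_of_nodup G hG
  have hselfC : PySem.Set.ofList (c0 :: rest) = c0 :: rest :=
    PySem.Set.ofList_eq_self_of_nodup _ hCnd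
  rw [hself, hselfC, pvInterFold]
  have hmemO : ∀ y, y ∈ PySem.Set.diff G (c0 :: rest) ↔ y ∈ G ∧ y ∉ c0 :: rest := by
    intro y; exact PySem.Set.mem_diff G (c0 :: rest) y
  by_cases hO : PySem.Set.diff G (c0 :: rest) = []
  · rw [if_neg (by simpa using hO)]
    unfold pvExcl
    apply List.filter_congr
    intro a ha
    rw [decide_eq_decide, pvSig_eq_iff d G hG c0 rest hC a ha]
    have hGC : ∀ g ∈ G, g ∈ c0 :: rest := by
      intro g hg
      by_contra hgc
      have : g ∈ PySem.Set.diff G (c0 :: rest) := (hmemO g).mpr ⟨hg, hgc⟩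
      simp [hO] at this
    constructor
    · intro h; exact ⟨h, fun g hg hgc _ => hgc (hGC g hg)⟩
    · exact fun h => h.1
  · rw [if_pos (by simpa using hO)]
    obtain ⟨o0, orest, hOe⟩ := List.exists_cons_of_ne_nil hO
    rw [hOe]
    unfold PySem.Set.diff pvExcl
    rw [List.filter_filter]
    apply List.filter_congr
    intro a ha
    rw [Bool.eq_iff_iff]
    simp only [Bool.and_eq_true, Bool.not_eq_eq_eq_not, Bool.not_true,
      decide_eq_true_eq, PySem.Set.contains_eq_listContains,
      List.contains_eq_mem, decide_eq_false_iff_not]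
    rw [pvSig_eq_iff d G hG c0 rest hC a ha]
    have hU : ∀ b, b ∈ orest.foldl (fun s g => PySem.Set.union s (d.getD g [])) (d.getD o0 []) ↔
        ∃ g ∈ o0 :: orest, b ∈ d.getD g [] := by
      intro b
      rw [pvUnionFoldMem]
      constructor
      · rintro (h | ⟨g, hg, h⟩)
        · exact ⟨o0, List.mem_cons_self, h⟩
        · exact ⟨g, List.mem_cons_of_mem _ hg, h⟩
      · rintro ⟨g, hg, h⟩
        rw [List.mem_cons] at hg
        rcases hg with rfl | hg
        · exact Or.inl h
        · exact Or.inr ⟨g, hg, h⟩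
    constructor
    · rintro ⟨hnu, h1⟩
      refine ⟨h1, fun g hg hgc hmem => ?_⟩
      exact hnu ((hU a).mpr ⟨g, by rw [← hOe] at *; exact (hmemO g).mpr ⟨hg, hgc⟩, hmem⟩)
    · rintro ⟨h1, h2⟩
      refine ⟨fun hin => ?_, h1⟩
      obtain ⟨g, hg, hmem⟩ := (hU a).mp hin
      rw [← hOe] at hg
      obtain ⟨hgG, hgC⟩ := (hmemO g).mp hg
      exact h2 g hgG hgC hmem

lemma pvAShape (gs : List (String × List String)) :
    compute_intersections gs =
      (PySem.List.sorted (pvEA (pvDict gs) (pvDict gs).keys) (fun x => (x.2.length : Int)) true,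
        (pvDict gs).keys) := by
  unfold compute_intersections
  dsimp only
  rw [pvPyRangeMap (pvDict gs).keys.length]
  set d := pvDict gs with hd
  set G := d.keys with hGdef
  have hG : G.Nodup := pvDict_keys_nodup gs
  refine congrArg (fun l => (PySem.List.sorted l (fun x : List String × List String => (x.2.length : Int)) true, G)) ?_
  refine (PySem.List.foldl_congr_mem _ _ _ _ ?hstep).trans
    ((PySem.List.foldl_append_eq_flatMap
        (g := fun r : Int => ((PySem.List.combinations G r.toNat).filter
            (fun C => decide (pvExcl d G C ≠ []))).map (fun C => (C, pvExcl d G C))) _ _).trans ?rest)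
  case rest =>
    rw [List.nil_append, List.flatMap_map]
    have htn : ∀ i : Nat, (((i : Int)) + 1).toNat = i + 1 := fun i => by omega
    simp only [htn]
    rw [pvFlatMapFilterMap]
    rfl
  case hstep =>
    intro acc r hr
    refine (PySem.List.foldl_congr_mem _ _ _ _ ?hcombo).trans
      (PySem.List.foldl_append_ite (fun C => pvExcl d G C ≠ []) (fun C => (C, pvExcl d G C)) _ acc)
    intro acc' C hCmem
    obtain ⟨hsub, hlen⟩ := (PySem.List.mem_combinations_iff G r.toNat C).mp hCmem
    simp only [List.mem_map, List.mem_range] at hr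
    obtain ⟨i, hi, rfl⟩ := hr
    have hCne : C ≠ [] := by
      intro h
      rw [h] at hlen
      have h2 : (((i : Int)) + 1).toNat = i + 1 := by omega
      rw [h2] at hlen
      simp at hlen
    obtain ⟨c0, rest, rfl⟩ := List.exists_cons_of_ne_nil hCne
    have hce := pvComboEval d G hG c0 rest hsub
    have hofl : PySem.Set.ofList (c0 :: rest) = c0 :: rest :=
      PySem.Set.ofList_eq_self_of_nodup _ (hsub.nodup hG)
    simp only at hce ⊢
    rw [hce, hofl]

-- ---- rank: strictly increasing along A's enumeration order ----
lemma pvSublist_sum_le (l₁ l₂ : List Int) (h : l₁.Sublist l₂) (hpos : ∀ x ∈ l₂, 0 ≤ x) :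
    l₁.sum ≤ l₂.sum := List.Sublist.sum_le_sum h hpos

lemma pvCombPairwise (ws : List Int) (r : Nat) (h1 : ∀ x ∈ ws, 1 ≤ x) (hs : pvSup ws) :
    (PySem.List.combinations ws r).Pairwise (fun u v => v.sum < u.sum) := by
  induction ws generalizing r with
  | nil =>
      cases r with
      | zero => rw [PySem.List.combinations_zero]; exact List.pairwise_singleton _ _
      | succ m => rw [PySem.List.combinations_nil_succ]; exact List.Pairwise.nil
  | cons x xs ih =>
      cases r with
      | zero => rw [PySem.List.combinations_zero]; exact List.pairwise_singleton _ _
      | succ m =>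
          have h1' : ∀ y ∈ xs, 1 ≤ y := fun y hy => h1 y (List.mem_cons_of_mem _ hy)
          have hs' : pvSup xs := hs.2
          rw [PySem.List.combinations_cons_succ, List.pairwise_append]
          refine ⟨?_, ih (m + 1) h1' hs', ?_⟩
          · rw [List.pairwise_map]
            exact (ih m h1' hs').imp (fun h => by
              simpa using by omega)
          · intro u hu v hv
            rw [List.mem_map] at hu
            obtain ⟨u', hu', rfl⟩ := hu
            obtain ⟨hvs, hvl⟩ := (PySem.List.mem_combinations_iff _ _ _).mp hv
            obtain ⟨hus, hul⟩ := (PySem.List.mem_combinations_iff _ _ _).mp hu'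
            have hv_le : v.sum ≤ xs.sum :=
              pvSublist_sum_le v xs hvs (fun y hy => le_trans (by norm_num) (h1' y hy))
            have hu_nonneg : 0 ≤ u'.sum :=
              List.sum_nonneg (fun y hy => le_trans (by norm_num) (h1' y (hus.subset hy)))
            simp only [List.sum_cons]
            have := hs.1
            omega

lemma pvPowlist (n : Nat) :
    (List.range (n + 1)).map (fun i => (2 : Int) ^ (n + 1 - 1 - i))
      = (2 : Int) ^ n :: (List.range n).map (fun i => (2 : Int) ^ (n - 1 - i)) := by
  rw [List.range_succ_eq_map, List.map_cons, List.map_map]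
  congr 1
  apply List.map_congr_left
  intro i _
  show (2 : Int) ^ (n + 1 - 1 - (i + 1)) = 2 ^ (n - 1 - i)
  congr 1
  omega

lemma pvPowlistSum (n : Nat) :
    ((List.range n).map (fun i => (2 : Int) ^ (n - 1 - i))).sum = 2 ^ n - 1 := by
  induction n with
  | zero => simp
  | succ m ih => rw [pvPowlist, List.sum_cons, ih]; ring

lemma pvPowlistSup (n : Nat) : pvSup ((List.range n).map (fun i => (2 : Int) ^ (n - 1 - i))) := by
  induction n with
  | zero => simp [pvSup]
  | succ m ih =>
      rw [pvPowlist]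
      refine ⟨?_, ih⟩
      rw [pvPowlistSum]
      omega

lemma pvIndexGetElem (G : List String) (hG : G.Nodup) (k : Nat) (hk : k < G.length) :
    (PySem.List.index? G G[k]).getD 0 = k := by
  rw [PySem.List.index?_eq_idxOf?]
  have hidx : List.idxOf G[k] G = k := hG.idxOf_getElem k hk
  rw [List.idxOf_eq_getD_idxOf?] at hidx
  cases h : List.idxOf? G[k] G with
  | none => rw [h] at hidx; simp at hidx; omega
  | some j => rw [h] at hidx; simpa using hidx

lemma pvW_ge_one (G : List String) (g : String) : 1 ≤ pvW G g :=
  one_le_pow₀ (by norm_num)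

lemma pvMapW_eq (G : List String) (hG : G.Nodup) :
    G.map (pvW G) = (List.range G.length).map (fun i => (2 : Int) ^ (G.length - 1 - i)) := by
  apply List.ext_getElem (by simp)
  intro k h1 h2
  simp only [List.getElem_map, List.getElem_range]
  unfold pvW
  rw [pvIndexGetElem G hG k (by simpa using h1)]

lemma pvCombW (G : List String) (hG : G.Nodup) (r : Nat) :
    (PySem.List.combinations G r).Pairwise
      (fun C C' => (C'.map (pvW G)).sum < (C.map (pvW G)).sum) := by
  have h := pvCombPairwise (G.map (pvW G)) r
    (fun x hx => by
      obtain ⟨g, _, rfl⟩ := List.mem_map.mp hx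
      exact pvW_ge_one G g)
    (by rw [pvMapW_eq G hG]; exact pvPowlistSup G.length)
  rw [PySem.List.combinations_map, List.pairwise_map] at h
  exact h

lemma pvSum_le (G : List String) (hG : G.Nodup) (C : List String) (hC : C.Sublist G) :
    (C.map (pvW G)).sum ≤ 2 ^ G.length - 1 := by
  have h1 : (C.map (pvW G)).Sublist (G.map (pvW G)) := hC.map _
  have h2 : (C.map (pvW G)).sum ≤ (G.map (pvW G)).sum :=
    pvSublist_sum_le _ _ h1 (fun x hx => by
      obtain ⟨g, _, rfl⟩ := List.mem_map.mp hx
      exact le_trans (by norm_num) (pvW_ge_one G g))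
  rw [pvMapW_eq G hG, pvPowlistSum] at h2
  exact h2

lemma pvSum_ge_one (G : List String) (C : List String) (hne : C ≠ []) :
    1 ≤ (C.map (pvW G)).sum := by
  obtain ⟨c, rest, rfl⟩ := List.exists_cons_of_ne_nil hne
  rw [List.map_cons, List.sum_cons]
  have h1 := pvW_ge_one G c
  have h2 : 0 ≤ (rest.map (pvW G)).sum :=
    List.sum_nonneg (fun x hx => by
      obtain ⟨g, _, rfl⟩ := List.mem_map.mp hx
      exact le_trans (by norm_num) (pvW_ge_one G g))
  omega

lemma pvRank_pairwise (G : List String) (hG : G.Nodup) :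
    (pvAll G).Pairwise (fun C C' => pvRank G C < pvRank G C') := by
  unfold pvAll
  rw [List.pairwise_flatMap]
  have hpow : (1 : Int) ≤ 2 ^ G.length := one_le_pow₀ (by norm_num)
  constructor
  · intro i _
    refine (pvCombW G hG (i + 1)).imp_of_mem ?_
    intro C C' hC hC' hlt
    obtain ⟨_, hlenC⟩ := (PySem.List.mem_combinations_iff _ _ _).mp hC
    obtain ⟨_, hlenC'⟩ := (PySem.List.mem_combinations_iff _ _ _).mp hC'
    unfold pvRank
    rw [hlenC, hlenC']
    omega
  · refine List.pairwise_lt_range.imp_of_mem ?_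
    intro i j hi hj hij C hC C' hC'
    obtain ⟨hsubC, hlenC⟩ := (PySem.List.mem_combinations_iff _ _ _).mp hC
    obtain ⟨hsubC', hlenC'⟩ := (PySem.List.mem_combinations_iff _ _ _).mp hC'
    have hCne : C ≠ [] := by intro h; rw [h] at hlenC; simp at hlenC
    have h1 : 1 ≤ (C.map (pvW G)).sum := pvSum_ge_one G C hCne
    have h2 : (C'.map (pvW G)).sum ≤ 2 ^ G.length - 1 := pvSum_le G hG C' hsubC'
    unfold pvRank
    rw [hlenC, hlenC']
    have hij' : ((i : Int) + 1) + 1 ≤ (j : Int) + 1 := by omega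
    have hmul : ((i : Int) + 1 + 1) * 2 ^ G.length ≤ ((j : Int) + 1) * 2 ^ G.length :=
      mul_le_mul_of_nonneg_right hij' (by positivity)
    push_cast
    nlinarith

-- ---- B-side buckets ----
lemma pvFlatMapSingle {α β : Type} [DecidableEq α] (G : List α) (f : α → List β) (s0 : α)
    (hmem : s0 ∈ G) (hnd : G.Nodup) (hz : ∀ g ∈ G, g ≠ s0 → f g = []) :
    G.flatMap f = f s0 := by
  induction G with
  | nil => cases hmem
  | cons g t ih =>
      rw [List.flatMap_cons]
      by_cases hgs : g = s0
      · subst hgs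
        have : t.flatMap f = [] := List.flatMap_eq_nil_iff.mpr (fun x hx =>
          hz x (List.mem_cons_of_mem _ hx)
            (fun hxg => (List.nodup_cons.mp hnd).1 (hxg ▸ hx)))
        rw [this, List.append_nil]
      · rw [hz g List.mem_cons_self hgs, List.nil_append]
        rcases List.mem_cons.mp hmem with rfl | hmem'
        · exact absurd rfl hgs
        · exact ih hmem' (List.nodup_cons.mp hnd).2 (fun x hx => hz x (List.mem_cons_of_mem _ hx))

lemma pvBuckets_getD (d : PySem.Dict String (List String)) (G : List String) (S : List String) :
    (pvBuckets d G).getD S [] =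
      ((G.flatMap (fun g => (d.getD g []).map (fun a => (g, a)))).filter
          (fun p => (pvSig d G p.2 == S) && decide ((pvSig d G p.2).head? = some p.1))).map
        (fun p => p.2) := by
  unfold pvBuckets
  rw [PySem.List.foldl_ite_eq_foldl_filter (fun p : String × String => (pvSig d G p.2).head? = some p.1)]
  have h := PySem.Dict.getD_foldl_modify_append
    (((G.flatMap (fun g => (d.getD g []).map (fun a => (g, a)))).filter
        (fun p => decide ((pvSig d G p.2).head? = some p.1))).map
      (fun p : String × String => (pvSig d G p.2, p.2)))
    PySem.Dict.empty S
  rw [List.foldl_map] at h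
  simp only [] at h
  rw [h, PySem.Dict.getD_empty, List.nil_append, List.filter_map, List.map_map,
    List.filter_filter]
  simp only [Function.comp_def]

lemma pvBuckets_getD_eq_excl (d : PySem.Dict String (List String)) (G : List String)
    (hG : G.Nodup) (s0 : String) (S' : List String) (hS : (s0 :: S').Sublist G) :
    (pvBuckets d G).getD (s0 :: S') [] = pvExcl d G (s0 :: S') := by
  rw [pvBuckets_getD]
  rw [List.filter_flatMap]
  have hs0 : s0 ∈ G := hS.subset List.mem_cons_self
  have hchunk : ∀ g ∈ G, g ≠ s0 →
      ((d.getD g []).map (fun a => (g, a))).filter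
        (fun p => (pvSig d G p.2 == s0 :: S') && decide ((pvSig d G p.2).head? = some p.1)) = [] := by
    intro g hg hne
    rw [List.filter_eq_nil_iff]
    rintro ⟨g', a⟩ hp hcond
    obtain ⟨a', _, heq⟩ := List.mem_map.mp hp
    cases heq
    simp only [Bool.and_eq_true, decide_eq_true_eq, beq_iff_eq] at hcond
    obtain ⟨hsigeq, hhead⟩ := hcond
    rw [hsigeq] at hhead
    simp only [List.head?_cons, Option.some.injEq] at hhead
    exact hne hhead.symm
  rw [pvFlatMapSingle G _ s0 hs0 hG hchunk]
  rw [List.filter_map, List.map_map]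
  rw [show ((fun p : String × String =>
      (pvSig d G p.2 == s0 :: S') && decide ((pvSig d G p.2).head? = some p.1)) ∘
        (fun a => (s0, a))) = (fun a => (pvSig d G a == s0 :: S') && decide ((pvSig d G a).head? = some s0))
    from rfl]
  have hpred : ∀ a, ((pvSig d G a == s0 :: S') && decide ((pvSig d G a).head? = some s0))
      = decide (pvSig d G a = s0 :: S') := by
    intro a
    rw [Bool.eq_iff_iff]
    simp only [Bool.and_eq_true, decide_eq_true_eq, beq_iff_eq]
    constructor
    · exact fun h => h.1
    · intro h; rw [h]; exact ⟨rfl, rfl⟩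
  rw [List.filter_congr (fun a _ => hpred a)]
  simp only [Function.comp_def]
  unfold pvExcl
  simp

lemma pvBuckets_keys_eq (d : PySem.Dict String (List String)) (G : List String) :
    (pvBuckets d G).keys = PySem.Set.ofList
      (((G.flatMap (fun g => (d.getD g []).map (fun a => (g, a)))).filter
          (fun p => decide ((pvSig d G p.2).head? = some p.1))).map (fun p => pvSig d G p.2)) := by
  unfold pvBuckets
  rw [PySem.List.foldl_ite_eq_foldl_filter (fun p : String × String => (pvSig d G p.2).head? = some p.1)]
  rw [PySem.Dict.keys_foldl_modify_key _ (fun p : String × String => pvSig d G p.2) []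
      (fun b p v => v ++ [p.2])]
  rw [PySem.Dict.keys_empty, PySem.Set.update_nil_left]

lemma pvBuckets_keys_nodup (d : PySem.Dict String (List String)) (G : List String) :
    (pvBuckets d G).keys.Nodup := by
  rw [pvBuckets_keys_eq]
  exact PySem.Set.nodup_ofList _

lemma pvMem_buckets_keys (d : PySem.Dict String (List String)) (G : List String) (_hG : G.Nodup)
    (S : List String) :
    S ∈ (pvBuckets d G).keys ↔ S.Sublist G ∧ S ≠ [] ∧ pvExcl d G S ≠ [] := by
  rw [pvBuckets_keys_eq, PySem.Set.mem_ofList]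
  constructor
  · intro h
    obtain ⟨p, hp, rfl⟩ := List.mem_map.mp h
    obtain ⟨hocc, hcond⟩ := List.mem_filter.mp hp
    obtain ⟨g, hgG, hmap⟩ := List.mem_flatMap.mp hocc
    obtain ⟨a, haval, heq⟩ := List.mem_map.mp hmap
    subst heq
    simp only [decide_eq_true_eq] at hcond
    have hgSig : g ∈ pvSig d G a := List.mem_filter.mpr ⟨hgG, decide_eq_true haval⟩
    have hne : pvSig d G a ≠ [] := fun hnil => by rw [hnil] at hgSig; cases hgSig
    refine ⟨pvSig_sublist d G a, hne, ?_⟩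
    obtain ⟨s0, S', hsig⟩ := List.exists_cons_of_ne_nil hne
    rw [hsig] at hcond
    simp only [List.head?_cons, Option.some.injEq] at hcond
    subst hcond
    rw [hsig]
    unfold pvExcl
    intro hcontra
    rw [List.filter_eq_nil_iff] at hcontra
    exact hcontra a haval (decide_eq_true hsig)
  · rintro ⟨hsub, hne, hexcl⟩
    obtain ⟨s0, S', rfl⟩ := List.exists_cons_of_ne_nil hne
    unfold pvExcl at hexcl
    obtain ⟨a, ha⟩ := List.exists_mem_of_ne_nil _ hexcl
    obtain ⟨haval, hsig⟩ := List.mem_filter.mp ha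
    have hsig' : pvSig d G a = s0 :: S' := of_decide_eq_true hsig
    refine List.mem_map.mpr ⟨(s0, a), ?_, hsig'⟩
    refine List.mem_filter.mpr ⟨?_, ?_⟩
    · refine List.mem_flatMap.mpr ⟨s0, hsub.subset List.mem_cons_self, ?_⟩
      exact List.mem_map.mpr ⟨a, haval, rfl⟩
    · simp only [decide_eq_true_eq, hsig', List.head?_cons]

lemma pvMem_pvAll (G : List String) (C : List String) :
    C ∈ pvAll G ↔ C.Sublist G ∧ C ≠ [] := by
  unfold pvAll
  rw [List.mem_flatMap]
  constructor
  · rintro ⟨i, hi, hC⟩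
    obtain ⟨hsub, hlen⟩ := (PySem.List.mem_combinations_iff _ _ _).mp hC
    exact ⟨hsub, fun hnil => by rw [hnil] at hlen; simp at hlen⟩
  · rintro ⟨hsub, hne⟩
    have hlen1 : 1 ≤ C.length := List.length_pos_iff.mpr hne
    have hlen2 : C.length ≤ G.length := hsub.length_le
    refine ⟨C.length - 1, List.mem_range.mpr (by omega), ?_⟩
    exact (PySem.List.mem_combinations_iff _ _ _).mpr ⟨hsub, by omega⟩

lemma pvAll_nodup_entries (G : List String) (hG : G.Nodup) : (pvAll G).Nodup := by
  have h := pvRank_pairwise G hG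
  exact h.imp_of_mem (fun _ _ hlt => by intro heq; subst heq; exact absurd hlt (lt_irrefl _))

lemma pvPerm (d : PySem.Dict String (List String)) (G : List String) (hG : G.Nodup) :
    (pvEA d G).Perm (pvBuckets d G).items := by
  have hitems : (pvBuckets d G).items =
      (pvBuckets d G).keys.map (fun k => (k, (pvBuckets d G).getD k [])) :=
    PySem.Dict.items_eq_map_keys _ (pvBuckets_keys_nodup d G) []
  rw [hitems]
  have hitems2 : (pvBuckets d G).keys.map (fun k => (k, (pvBuckets d G).getD k []))
      = (pvBuckets d G).keys.map (fun k => (k, pvExcl d G k)) := by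
    apply List.map_congr_left
    intro S hS
    obtain ⟨hsub, hne, _⟩ := (pvMem_buckets_keys d G hG S).mp hS
    obtain ⟨s0, S', rfl⟩ := List.exists_cons_of_ne_nil hne
    rw [pvBuckets_getD_eq_excl d G hG s0 S' hsub]
  rw [hitems2]
  unfold pvEA
  apply List.Perm.map
  rw [List.perm_ext_iff_of_nodup
    ((pvAll_nodup_entries G hG).filter _) (pvBuckets_keys_nodup d G)]
  intro S
  rw [List.mem_filter, pvMem_buckets_keys d G hG, pvMem_pvAll, decide_eq_true_eq]
  tauto

lemma pvSorted_items (d : PySem.Dict String (List String)) (G : List String) (hG : G.Nodup) :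
    PySem.List.sorted (pvBuckets d G).items (fun kv => pvRank G kv.1) false = pvEA d G := by
  apply PySem.List.sorted_eq_of_perm_of_pairwise_lt
  · exact pvPerm d G hG
  · unfold pvEA
    rw [List.pairwise_map]
    exact (pvRank_pairwise G hG).filter _

lemma pvBShape (gs : List (String × List String)) :
    compute_intersections_alt gs =
      (PySem.List.sorted (pvEA (pvDict gs) (pvDict gs).keys) (fun x => (x.2.length : Int)) true,
        (pvDict gs).keys) := by
  unfold compute_intersections_alt
  dsimp only
  set d := pvDict gs with hd
  set G := d.keys with hGdef
  have hG : G.Nodup := pvDict_keys_nodup gs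
  refine congrArg (fun l => (PySem.List.sorted l
      (fun x : List String × List String => (x.2.length : Int)) true, G)) ?_
  refine (congrArg (List.map (fun kv : List String × List String =>
      (PySem.Set.ofList kv.1, PySem.Set.ofList kv.2))) (pvSorted_items d G hG)).trans ?h2
  case h2 =>
    refine (List.map_congr_left ?_).trans (List.map_id _)
    intro kv hkv
    unfold pvEA at hkv
    obtain ⟨C, hC, rfl⟩ := List.mem_map.mp hkv
    obtain ⟨hCall, _⟩ := List.mem_filter.mp hC
    obtain ⟨hsub, hne⟩ := (pvMem_pvAll G C).mp hCall
    have hCnd : C.Nodup := hsub.nodup hG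
    have hend : (pvExcl d G C).Nodup := by
      obtain ⟨c0, rest, rfl⟩ := List.exists_cons_of_ne_nil hne
      unfold pvExcl
      exact (pvDict_val_nodup gs c0).filter _
    show (PySem.Set.ofList C, PySem.Set.ofList (pvExcl d G C)) = (C, pvExcl d G C)
    rw [PySem.Set.ofList_eq_self_of_nodup _ hCnd, PySem.Set.ofList_eq_self_of_nodup _ hend]


-- ===== VERDICT (by name: the statement is the Claim_ definition above) =====
theorem compute_intersections_spec : Claim_equal_compute_intersections := by
  intro gs _
  unfold Spec_compute_intersections
  rw [pvAShape gs, pvBShape gs]
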